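-- pv_equiv track=rewrite | github.com/nens/flooding-public | nens/sobek.py | despace_strings
-- ===== SOURCE A (Python) =====
-- def despace_strings(text):
--     """returns altered text where included strings have no spaces.
--     """
--
--     instring = False
--     result = []
--     for ch in text:
--         if ch == "'":
--             instring = not instring
--         if (ch in [' ', '\t']) and instring:
--             ch = chr(0)
--         result.append(ch)
--     result = ''.join(result)
--     return result
-- ===== SOURCE B (Python) =====
-- def despace_strings(text):
--     """returns altered text where included strings have no spaces.
--     """
--     parts = text.split("'")
--     parts = [p.replace(' ', chr(0)).replace('\t', chr(0)) if i % 2 == 1 else p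
--              for i, p in enumerate(parts)]
--     return "'".join(parts)
-- ===== Notes on version B (the rewrite author's own statement) =====
-- stated objective: simpler
-- what changed: B splits the text on the quote character and despaces only the odd-indexed (inside-quote) segments with str.replace, rejoining with a quote, instead of A's character-by-character loop with an in-string flag.
import Mathlib
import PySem

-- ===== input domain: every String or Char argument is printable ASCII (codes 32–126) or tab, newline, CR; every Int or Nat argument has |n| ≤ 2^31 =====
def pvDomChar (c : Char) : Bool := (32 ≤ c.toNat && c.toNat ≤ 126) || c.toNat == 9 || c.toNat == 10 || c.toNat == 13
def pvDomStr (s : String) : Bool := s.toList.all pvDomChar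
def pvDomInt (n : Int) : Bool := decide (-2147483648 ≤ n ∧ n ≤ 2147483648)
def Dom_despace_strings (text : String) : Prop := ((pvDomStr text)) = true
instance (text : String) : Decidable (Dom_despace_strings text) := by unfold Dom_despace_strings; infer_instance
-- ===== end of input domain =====

-- B replaces A's character loop with an in-string flag by split-on-quote /
-- despace odd segments / rejoin: simpler decomposition, same cost.

-- ===== PORT A =====
-- literal port of A: a fold carrying (instring, accumulated chars)
def despace_strings (text : String) : String :=
  let r := text.toList.foldl (fun (st : Bool × List Char) ch =>
    let instring := if ch == '\'' then !st.1 else st.1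
    let ch := if ([' ', '\t'].contains ch) && instring then Char.ofNat 0 else ch
    (instring, st.2 ++ [ch])) (false, [])
  String.mk r.2

-- ===== PORT B =====
-- literal port of Source B: split on quote, despace odd-indexed segments, rejoin
def despace_strings_alt (text : String) : String :=
  let parts := PySem.Chars.splitOn text.toList ['\'']
  let parts := (PySem.List.enumerate parts).map (fun ip =>
    if PySem.Int.mod ip.1 2 == 1 then
      PySem.Chars.replace (PySem.Chars.replace ip.2 [' '] [Char.ofNat 0]) ['\t'] [Char.ofNat 0]
    else ip.2)
  String.mk (PySem.Chars.join ['\''] parts)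

-- ===== PRECONDITION & SPEC =====
def Spec_despace_strings (text : String) (out : String) : Prop := out = despace_strings_alt text
instance (text : String) (out : String) : Decidable (Spec_despace_strings text out) := by unfold Spec_despace_strings; infer_instance

-- ===== CLAIM (what is proved, stated in full; the proofs are below) =====
def Claim_equal_despace_strings : Prop := ∀ (text : String), Dom_despace_strings text → Spec_despace_strings text (despace_strings text)

-- ===== LEMMAS AND PROOFS =====

-- despacing one character
def pvF (c : Char) : Char := if c == ' ' || c == '\t' then Char.ofNat 0 else c

-- A's loop, written as forward recursion
def pvLoopA (b : Bool) : List Char → List Char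
  | [] => []
  | c :: rest =>
    let b' := if c == '\'' then !b else b
    (if ([' ', '\t'].contains c) && b' then Char.ofNat 0 else c) :: pvLoopA b' rest

-- split on the quote character, forward recursion with the current segment
def pvSplit (pre : List Char) : List Char → List (List Char)
  | [] => [pre]
  | c :: rest => if c == '\'' then pre :: pvSplit [] rest else pvSplit (pre ++ [c]) rest

-- apply pvF to alternate segments (b = this segment is inside quotes)
def pvMapAlt (b : Bool) : List (List Char) → List (List Char)
  | [] => []
  | s :: t => (if b then s.map pvF else s) :: pvMapAlt (!b) t

theorem pvFoldA (cs : List Char) : ∀ (b : Bool) (acc : List Char),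
    (cs.foldl (fun (st : Bool × List Char) ch =>
      let instring := if ch == '\'' then !st.1 else st.1
      let ch := if ([' ', '\t'].contains ch) && instring then Char.ofNat 0 else ch
      (instring, st.2 ++ [ch])) (b, acc)).2 = acc ++ pvLoopA b cs := by
  induction cs with
  | nil => intro b acc; simp [pvLoopA]
  | cons c rest ih => intro b acc; simp only [List.foldl, pvLoopA, ih]; simp

theorem pvGoSpec : ∀ (l cur : List Char) (acc : List (List Char)) (fuel : Nat), l.length ≤ fuel →
    PySem.Chars.splitOn.go ['\''] fuel l cur acc = acc.reverse ++ pvSplit cur.reverse l := by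
  intro l
  induction l with
  | nil =>
    intro cur acc fuel _
    cases fuel <;> simp [PySem.Chars.splitOn.go, pvSplit]
  | cons c rest ih =>
    intro cur acc fuel hf
    cases fuel with
    | zero => simp at hf
    | succ f =>
      simp only [PySem.Chars.splitOn.go]
      by_cases hc : c = '\''
      · subst hc
        rw [if_pos (by simp [List.isPrefixOf])]
        simp only [List.length_singleton, List.drop_succ_cons, List.drop_zero]
        rw [ih [] (List.reverse cur :: acc) f (by simpa using Nat.succ_le_succ_iff.mp hf)]
        simp [pvSplit]
      · rw [if_neg (by simp [List.isPrefixOf]; intro h; exact absurd h.symm hc)]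
        rw [ih (c :: cur) acc f (by simpa using Nat.succ_le_succ_iff.mp hf)]
        simp [pvSplit, hc]

theorem pvSplitOn (cs : List Char) :
    PySem.Chars.splitOn cs ['\''] = pvSplit [] cs := by
  unfold PySem.Chars.splitOn
  rw [pvGoSpec cs [] [] (cs.length + 1) (by omega)]
  simp

theorem pvRepGo (a b : Char) : ∀ (l acc : List Char) (fuel : Nat), l.length ≤ fuel →
    PySem.Chars.replace.go [a] [b] fuel l acc
      = acc.reverse ++ l.map (fun c => if c == a then b else c) := by
  intro l
  induction l with
  | nil => intro acc fuel _; cases fuel <;> simp [PySem.Chars.replace.go]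
  | cons c rest ih =>
    intro acc fuel hf
    cases fuel with
    | zero => simp at hf
    | succ f =>
      simp only [PySem.Chars.replace.go]
      by_cases hc : c = a
      · subst hc
        rw [if_pos (by simp [List.isPrefixOf])]
        simp only [List.length_singleton, List.drop_succ_cons, List.drop_zero]
        rw [ih ([b].reverse ++ acc) f (by simpa using Nat.succ_le_succ_iff.mp hf)]
        simp
      · rw [if_neg (by simp [List.isPrefixOf]; intro h; exact absurd h.symm hc)]
        rw [ih (c :: acc) f (by simpa using Nat.succ_le_succ_iff.mp hf)]
        simp [hc]

theorem pvReplaceSingle (a b : Char) (s : List Char) :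
    PySem.Chars.replace s [a] [b] = s.map (fun c => if c == a then b else c) := by
  unfold PySem.Chars.replace
  rw [if_neg (by simp), pvRepGo a b s [] s.length (le_refl _)]
  simp

theorem pvDouble (s : List Char) :
    PySem.Chars.replace (PySem.Chars.replace s [' '] [Char.ofNat 0]) ['\t'] [Char.ofNat 0]
      = s.map pvF := by
  rw [pvReplaceSingle, pvReplaceSingle, List.map_map]
  apply List.map_congr_left
  intro c _
  by_cases h1 : c = ' ' <;> by_cases h2 : c = '\t' <;> simp [pvF, h1, h2]

theorem pvModSucc (n : Int) : (PySem.Int.mod (n + 1) 2 == 1) = !(PySem.Int.mod n 2 == 1) := by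
  have h2 : PySem.Int.mod (n + 1) 2 = (n + 1) % 2 := by
    simp [PySem.Int.mod, Int.fmod_eq_emod]
  have h3 : PySem.Int.mod n 2 = n % 2 := by
    simp [PySem.Int.mod, Int.fmod_eq_emod]
  rw [h2, h3]
  have h1 : n % 2 = 0 ∨ n % 2 = 1 := by omega
  have ha : (n + 1) % 2 = (n % 2 + 1) % 2 := by omega
  rcases h1 with h | h <;> rw [ha, h] <;> decide

theorem pvEnumMap (ps : List (List Char)) : ∀ (n : Int),
    ((PySem.List.enumerate ps n).map (fun ip =>
      if PySem.Int.mod ip.1 2 == 1 then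
        PySem.Chars.replace (PySem.Chars.replace ip.2 [' '] [Char.ofNat 0]) ['\t'] [Char.ofNat 0]
      else ip.2))
      = pvMapAlt (PySem.Int.mod n 2 == 1) ps := by
  induction ps with
  | nil => intro n; simp [PySem.List.enumerate, pvMapAlt]
  | cons s t ih =>
    intro n
    simp only [PySem.List.enumerate, List.map_cons, pvMapAlt, ih (n + 1), pvModSucc]
    congr 1
    by_cases h : PySem.Int.mod n 2 == 1 <;> simp [pvDouble]

-- the head-segment shift: pvSplit pre cs prepends pre onto the first segment
theorem pvSplitShift (cs : List Char) :
    ∃ s t, pvSplit [] cs = s :: t ∧ ∀ pre, pvSplit pre cs = (pre ++ s) :: t := by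
  induction cs with
  | nil => exact ⟨[], [], rfl, fun pre => by simp [pvSplit]⟩
  | cons c rest ih =>
    by_cases hc : c = '\''
    · exact ⟨[], pvSplit [] rest, by simp [pvSplit, hc], fun pre => by simp [pvSplit, hc]⟩
    · obtain ⟨s, t, h0, hp⟩ := ih
      refine ⟨c :: s, t, ?_, fun pre => ?_⟩
      · simp [pvSplit, hc]; exact hp [c]
      · simp [pvSplit, hc]; rw [hp (pre ++ [c])]; simp

theorem pvJoinStep (b : Bool) (c : Char) (s : List Char) (t : List (List Char)) :
    PySem.Chars.join ['\''] (pvMapAlt b ((c :: s) :: t))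
      = (if b then pvF c else c) :: PySem.Chars.join ['\''] (pvMapAlt b (s :: t)) := by
  cases t with
  | nil =>
    cases b <;> simp [pvMapAlt, PySem.Chars.join_singleton]
  | cons u v =>
    cases b <;>
      simp [pvMapAlt, PySem.Chars.join_cons_cons]

theorem pvMain (cs : List Char) : ∀ (b : Bool),
    PySem.Chars.join ['\''] (pvMapAlt b (pvSplit [] cs)) = pvLoopA b cs := by
  induction cs with
  | nil => intro b; cases b <;> simp [pvSplit, pvMapAlt, pvLoopA, PySem.Chars.join_singleton]
  | cons c rest ih =>
    intro b
    by_cases hc : c = '\''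
    · subst hc
      have : pvSplit ([] : List Char) ('\'' :: rest) = [] :: pvSplit [] rest := by
        simp [pvSplit]
      rw [this]
      obtain ⟨s, t, h0, _⟩ := pvSplitShift rest
      rw [h0]
      have hj : PySem.Chars.join ['\''] (pvMapAlt b ([] :: s :: t))
          = '\'' :: PySem.Chars.join ['\''] (pvMapAlt (!b) (s :: t)) := by
        cases b <;> simp [pvMapAlt, PySem.Chars.join_cons_cons]
      rw [hj, ← h0, ih (!b)]
      cases b <;> simp [pvLoopA]
    · have h1 : pvSplit ([] : List Char) (c :: rest) = pvSplit [c] rest := by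
        simp [pvSplit, hc]
      obtain ⟨s, t, h0, hp⟩ := pvSplitShift rest
      rw [h1, hp [c], List.singleton_append]
      rw [pvJoinStep, ← h0, ih b]
      have hb' : (if c == '\'' then !b else b) = b := by simp [hc]
      simp only [pvLoopA, hb']
      congr 1
      cases b <;> simp [pvF]

-- ===== VERDICT (by name: the statement is the Claim_ definition above) =====
theorem despace_strings_spec : Claim_equal_despace_strings := by
  intro text _
  unfold Spec_despace_strings despace_strings despace_strings_alt
  simp only [pvFoldA text.toList false [], List.nil_append, pvSplitOn,
    pvEnumMap (pvSplit [] text.toList) 0]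
  rw [show (PySem.Int.mod 0 2 == 1) = false by decide, pvMain]
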